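-- pv_equiv track=rewrite | github.com/archaeans/archaea-simulation | archaea_simulation/bes/schedule/generator.py | sequential_compact_schedule_generator
-- ===== SOURCE A (Python) =====
-- def sequential_compact_schedule_generator(name: str, schedule_type_limit_name: str, days: "list[int]", months: "list[int]") -> str:
--     schedule_string = ""
--     schedule_string += "!-   ===========  OUTPUT SCHEDULE ===========" + "\n\n"
--     schedule_string += "Schedule:Compact," + "\n"
--     schedule_string += "{name},\t\t\t!- Name\n".format(name=name)
--     schedule_string += "{name},\t\t\t!- Schedule Type Limits Name\n".format(name=schedule_type_limit_name)
--     field = 1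
--     for m in months:
--         for d in days:
--             m_fill = str(m).zfill(2)
--             d_fill = str(d).zfill(2)
--             d_next_fill = str(d+1).zfill(2)
--             schedule_string += "Through: {month}/{day},\t\t\t!- Field {field}\n".format(month=m_fill, day=d_fill, field=field)
--             field += 1
--             schedule_string += "For:AllDays,\t\t\t!- Field {field}\n".format(field=field)
--             field += 1
--             schedule_string += "Until: 24:00,\t\t\t!- Field {field}\n".format(field=field)
--             field += 1
--             schedule_string += "0,\t\t\t!- Field {field}\n".format(field=field)
--             field += 1
--             schedule_string += "Through: {month}/{day},\t\t\t!- Field {field}\n".format(month=m_fill, day=d_next_fill, field=field)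
--             field += 1
--             schedule_string += "For:AllDays,\t\t\t!- Field {field}\n".format(field=field)
--             field += 1
--             schedule_string += "Until: 24:00,\t\t\t!- Field {field}\n".format(field=field)
--             field += 1
--             schedule_string += "1,\t\t\t!- Field {field}\n".format(field=field)
--             field += 1
--     schedule_string += "Through: 12/31,\t\t\t!- Field {field}\n".format(field=field)
--     field += 1
--     schedule_string += "For:AllDays,\t\t\t!- Field {field}\n".format(field=field)
--     field += 1
--     schedule_string += "Until: 24:00,\t\t\t!- Field {field}\n".format(field=field)
--     field += 1
--     schedule_string += "0;\t\t\t!- Field {field}\n\n\n".format(field=field)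
--     field =+ 1
--
--     # schedule_string += "For: Allotherdays,\t\t\t!- Field {field}\n".format(field=field)
--     # field += 1
--     # schedule_string += "Until: 24:00,\t\t\t!- Field {field}\n".format(field=field)
--     # field += 1
--     # schedule_string += "0;\t\t\t!- Field {field}\n\n\n".format(field=field)
--     return schedule_string
-- ===== SOURCE B (Python) =====
-- def sequential_compact_schedule_generator(name: str, schedule_type_limit_name: str, days: "list[int]", months: "list[int]") -> str:
--     # Content first: the semantic line bodies in order, then one uniform numbering pass.
--     bodies = []
--     for m in months:
--         mf = str(m).zfill(2)
--         for d in days: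
--             df = str(d).zfill(2)
--             dnf = str(d + 1).zfill(2)
--             bodies.extend([f"Through: {mf}/{df}", "For:AllDays", "Until: 24:00", "0",
--                            f"Through: {mf}/{dnf}", "For:AllDays", "Until: 24:00", "1"])
--     bodies.extend(["Through: 12/31", "For:AllDays", "Until: 24:00", "0"])
--     out = ("!-   ===========  OUTPUT SCHEDULE ===========" + "\n\n"
--            + "Schedule:Compact," + "\n"
--            + name + ",\t\t\t!- Name\n"
--            + schedule_type_limit_name + ",\t\t\t!- Schedule Type Limits Name\n")
--     n = len(bodies)
--     for i, body in enumerate(bodies, 1):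
--         if i == n:
--             out += body + ";\t\t\t!- Field " + str(i) + "\n\n\n"
--         else:
--             out += body + ",\t\t\t!- Field " + str(i) + "\n"
--     return out
-- ===== Notes on version B (the rewrite author's own statement) =====
-- stated objective: alternative
-- what changed: A interleaves formatting with a manually incremented field counter across twelve distinct format statements; B first generates the list of semantic line bodies (eight per month/day pair plus the four trailing ones) and then numbers and terminates them in one uniform enumerate-style pass, using ';' and the triple newline only on the final line.
import Mathlib
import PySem

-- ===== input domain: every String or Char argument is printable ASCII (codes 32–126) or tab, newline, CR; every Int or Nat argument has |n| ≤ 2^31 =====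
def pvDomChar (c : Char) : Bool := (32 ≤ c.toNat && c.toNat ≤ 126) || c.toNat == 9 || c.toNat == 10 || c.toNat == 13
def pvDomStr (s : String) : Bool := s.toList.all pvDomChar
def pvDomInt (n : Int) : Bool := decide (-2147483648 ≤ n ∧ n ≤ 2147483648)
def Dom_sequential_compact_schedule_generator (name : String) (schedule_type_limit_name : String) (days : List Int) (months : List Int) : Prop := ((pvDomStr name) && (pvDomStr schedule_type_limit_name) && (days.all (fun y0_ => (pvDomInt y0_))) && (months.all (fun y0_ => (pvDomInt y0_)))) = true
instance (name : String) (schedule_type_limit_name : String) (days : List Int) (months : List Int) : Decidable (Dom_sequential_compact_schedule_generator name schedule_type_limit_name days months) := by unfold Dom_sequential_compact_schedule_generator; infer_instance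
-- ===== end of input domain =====

-- B replaces A's interleaved emission with a manual field counter by content-first body
-- generation followed by a single uniform numbering pass (same output, 'alternative' objective).

-- ===== PORT A =====
-- inner 'for d in days' loop: appends the eight lines, incrementing 'field' after each
def pvDayLoopA : List Int → Int → String → Int → String × Int
  | [], _, s, f => (s, f)
  | d :: ds, m, s, f =>
    let mf := PySem.Str.zfill (PySem.Int.toStr m) 2
    let df := PySem.Str.zfill (PySem.Int.toStr d) 2
    let dnf := PySem.Str.zfill (PySem.Int.toStr (d + 1)) 2
    let s := s ++ "Through: " ++ mf ++ "/" ++ df ++ ",\t\t\t!- Field " ++ PySem.Int.toStr f ++ "\n"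
    let f := f + 1
    let s := s ++ "For:AllDays,\t\t\t!- Field " ++ PySem.Int.toStr f ++ "\n"
    let f := f + 1
    let s := s ++ "Until: 24:00,\t\t\t!- Field " ++ PySem.Int.toStr f ++ "\n"
    let f := f + 1
    let s := s ++ "0,\t\t\t!- Field " ++ PySem.Int.toStr f ++ "\n"
    let f := f + 1
    let s := s ++ "Through: " ++ mf ++ "/" ++ dnf ++ ",\t\t\t!- Field " ++ PySem.Int.toStr f ++ "\n"
    let f := f + 1
    let s := s ++ "For:AllDays,\t\t\t!- Field " ++ PySem.Int.toStr f ++ "\n"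
    let f := f + 1
    let s := s ++ "Until: 24:00,\t\t\t!- Field " ++ PySem.Int.toStr f ++ "\n"
    let f := f + 1
    let s := s ++ "1,\t\t\t!- Field " ++ PySem.Int.toStr f ++ "\n"
    let f := f + 1
    pvDayLoopA ds m s f

-- outer 'for m in months' loop
def pvMonthLoopA : List Int → List Int → String → Int → String × Int
  | [], _, s, f => (s, f)
  | m :: ms, ds, s, f =>
    let r := pvDayLoopA ds m s f
    pvMonthLoopA ms ds r.1 r.2

def sequential_compact_schedule_generator (name : String) (schedule_type_limit_name : String) (days : List Int) (months : List Int) : String :=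
  let s := ""
  let s := s ++ ("!-   ===========  OUTPUT SCHEDULE ===========" ++ "\n\n")
  let s := s ++ ("Schedule:Compact," ++ "\n")
  let s := s ++ (name ++ ",\t\t\t!- Name\n")
  let s := s ++ (schedule_type_limit_name ++ ",\t\t\t!- Schedule Type Limits Name\n")
  let r := pvMonthLoopA months days s 1
  let s := r.1
  let f := r.2
  let s := s ++ "Through: 12/31,\t\t\t!- Field " ++ PySem.Int.toStr f ++ "\n"
  let f := f + 1
  let s := s ++ "For:AllDays,\t\t\t!- Field " ++ PySem.Int.toStr f ++ "\n"
  let f := f + 1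
  let s := s ++ "Until: 24:00,\t\t\t!- Field " ++ PySem.Int.toStr f ++ "\n"
  let f := f + 1
  let s := s ++ "0;\t\t\t!- Field " ++ PySem.Int.toStr f ++ "\n\n\n"
  s

-- ===== PORT B =====
def pvEightBodies (m d : Int) : List String :=
  let mf := PySem.Str.zfill (PySem.Int.toStr m) 2
  let df := PySem.Str.zfill (PySem.Int.toStr d) 2
  let dnf := PySem.Str.zfill (PySem.Int.toStr (d + 1)) 2
  ["Through: " ++ mf ++ "/" ++ df, "For:AllDays", "Until: 24:00", "0",
   "Through: " ++ mf ++ "/" ++ dnf, "For:AllDays", "Until: 24:00", "1"]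

def pvBodies (days months : List Int) : List String :=
  months.flatMap (fun m => days.flatMap (fun d => pvEightBodies m d))
    ++ ["Through: 12/31", "For:AllDays", "Until: 24:00", "0"]

-- the single numbering pass: 'for i, body in enumerate(bodies, 1)'
def pvNumberLoop (n : Int) : Int → List String → String
  | _, [] => ""
  | i, b :: rest =>
    (if i == n then b ++ ";\t\t\t!- Field " ++ PySem.Int.toStr i ++ "\n\n\n"
     else b ++ ",\t\t\t!- Field " ++ PySem.Int.toStr i ++ "\n") ++ pvNumberLoop n (i + 1) rest

def sequential_compact_schedule_generator_alt (name : String) (schedule_type_limit_name : String) (days : List Int) (months : List Int) : String :=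
  let bodies := pvBodies days months
  let out := "!-   ===========  OUTPUT SCHEDULE ===========" ++ "\n\n"
    ++ "Schedule:Compact," ++ "\n"
    ++ name ++ ",\t\t\t!- Name\n"
    ++ schedule_type_limit_name ++ ",\t\t\t!- Schedule Type Limits Name\n"
  out ++ pvNumberLoop (Int.ofNat bodies.length) 1 bodies

-- ===== PRECONDITION & SPEC =====
def Spec_sequential_compact_schedule_generator (name : String) (schedule_type_limit_name : String) (days : List Int) (months : List Int) (out : String) : Prop := out = sequential_compact_schedule_generator_alt name schedule_type_limit_name days months
instance (name : String) (schedule_type_limit_name : String) (days : List Int) (months : List Int) (out : String) : Decidable (Spec_sequential_compact_schedule_generator name schedule_type_limit_name days months out) := by unfold Spec_sequential_compact_schedule_generator; infer_instance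

-- ===== CLAIM (what is proved, stated in full; the proofs are below) =====
def Claim_equal_sequential_compact_schedule_generator : Prop := ∀ (name : String) (schedule_type_limit_name : String) (days : List Int) (months : List Int), Dom_sequential_compact_schedule_generator name schedule_type_limit_name days months → Spec_sequential_compact_schedule_generator name schedule_type_limit_name days months (sequential_compact_schedule_generator name schedule_type_limit_name days months)

-- ===== LEMMAS AND PROOFS =====

-- one comma-terminated (non-final) line, and all of them for a body list
def pvComma (i : Int) (b : String) : String := b ++ ",\t\t\t!- Field " ++ PySem.Int.toStr i ++ "\n"
def pvCommaAll : Int → List String → String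
  | _, [] => ""
  | i, b :: bs => pvComma i b ++ pvCommaAll (i + 1) bs

lemma pvCommaAll_append (xs ys : List String) (i : Int) :
    pvCommaAll i (xs ++ ys) = pvCommaAll i xs ++ pvCommaAll (i + xs.length) ys := by
  induction xs generalizing i with
  | nil => simp [pvCommaAll]
  | cons b xs ih =>
    simp [pvCommaAll, ih, String.append_assoc]
    ring_nf

set_option maxRecDepth 8192 in
lemma pvDayLoopA_eq (ds : List Int) (m : Int) (s : String) (f : Int) :
    pvDayLoopA ds m s f =
      (s ++ pvCommaAll f (ds.flatMap (fun d => pvEightBodies m d)),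
       f + (ds.flatMap (fun d => pvEightBodies m d)).length) := by
  induction ds generalizing s f with
  | nil => simp [pvDayLoopA, pvCommaAll]
  | cons d ds ih =>
    simp only [pvDayLoopA, ih, List.flatMap_cons, pvEightBodies, List.cons_append,
      List.nil_append, pvCommaAll, pvComma, List.length_cons,
      Prod.mk.injEq]
    constructor
    · rw [← String.toList_inj]; simp [String.toList_append]
    · push_cast; ring

lemma pvMonthLoopA_eq (ms ds : List Int) (s : String) (f : Int) :
    pvMonthLoopA ms ds s f =
      (s ++ pvCommaAll f (ms.flatMap (fun m => ds.flatMap (fun d => pvEightBodies m d))),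
       f + (ms.flatMap (fun m => ds.flatMap (fun d => pvEightBodies m d))).length) := by
  induction ms generalizing s f with
  | nil => simp [pvMonthLoopA, pvCommaAll]
  | cons m ms ih =>
    simp only [pvMonthLoopA, pvDayLoopA_eq, ih, List.flatMap_cons, pvCommaAll_append,
      List.length_append, Prod.mk.injEq]
    constructor
    · rw [← String.toList_inj]; simp [String.toList_append]
    · push_cast; ring

lemma pvNumberLoop_split (xs t : List String) (n i : Int) (h : i + xs.length ≤ n) :
    pvNumberLoop n i (xs ++ t) = pvCommaAll i xs ++ pvNumberLoop n (i + xs.length) t := by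
  induction xs generalizing i with
  | nil => simp [pvCommaAll]
  | cons b xs ih =>
    have hne : (i == n) = false := by
      simp only [List.length_cons] at h
      simp only [beq_eq_false_iff_ne, ne_eq]
      push_cast at h; omega
    have hle : (i + 1) + (xs.length : Int) ≤ n := by
      simp only [List.length_cons] at h; push_cast at h ⊢; omega
    have harith : i + 1 + (xs.length : Int) = i + ((xs.length : Nat) + 1 : Nat) := by push_cast; ring
    simp [List.cons_append, pvNumberLoop, hne, pvCommaAll, pvComma,
      ih _ hle, harith, String.append_assoc]

-- ===== VERDICT (by name: the statement is the Claim_ definition above) =====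
set_option maxRecDepth 16384 in
theorem sequential_compact_schedule_generator_spec : Claim_equal_sequential_compact_schedule_generator := by
  intro name stl days months _
  show _ = _
  unfold sequential_compact_schedule_generator sequential_compact_schedule_generator_alt
  simp only [pvMonthLoopA_eq]
  set K := months.flatMap (fun m => days.flatMap (fun d => pvEightBodies m d)) with hK
  have hsplit := pvNumberLoop_split K ["Through: 12/31", "For:AllDays", "Until: 24:00", "0"]
      (Int.ofNat (pvBodies days months).length) 1 (by simp [pvBodies, hK]; omega)
  simp only [pvBodies, ← hK] at hsplit ⊢
  rw [hsplit]
  have hn : Int.ofNat (K ++ ["Through: 12/31", "For:AllDays", "Until: 24:00", "0"]).length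
      = (1 + (K.length : Int)) + 3 := by simp; omega
  have h1 : ((1 + (K.length : Int)) == (1 + (K.length : Int)) + 3) = false := by
    simp only [beq_eq_false_iff_ne, ne_eq]; omega
  have h2 : ((1 + (K.length : Int) + 1) == (1 + (K.length : Int)) + 3) = false := by
    simp only [beq_eq_false_iff_ne, ne_eq]; omega
  have h3 : ((1 + (K.length : Int) + 1 + 1) == (1 + (K.length : Int)) + 3) = false := by
    simp only [beq_eq_false_iff_ne, ne_eq]; omega
  have h4 : ((1 + (K.length : Int) + 1 + 1 + 1) == (1 + (K.length : Int)) + 3) = true := by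
    simp only [beq_iff_eq]; ring
  simp only [pvNumberLoop, hn, h1, h2, h3, h4, if_true]
  rw [← String.toList_inj]
  simp [String.toList_append]
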